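-- pv_equiv track=rewrite | github.com/tertychnyy/tadhack2 | webapp/analyze.py | get_good_from_name
-- ===== SOURCE A (Python) =====
-- def get_good_from_name(name, dictionary):
--     d = dict()
--
--     for item in dictionary:
--         if name in item:
--             if item in d.keys():
--                 d[item] += 1
--             else:
--                 d[item] = 1
--
--     ret_name = None
--     ret_count = 0
--     for item in d.keys():
--         if d[item] > ret_count:
--             ret_name = item
--             ret_count = d[item]
--
--     return ret_name.title()
-- ===== SOURCE B (Python) =====
-- def get_good_from_name(name, dictionary):
--     ms = [item for item in dictionary if name in item]
--     ret_name, best = None, 0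
--     while ms:
--         x = ms[0]
--         c = ms.count(x)
--         if c > best:
--             ret_name, best = x, c
--         ms = [y for y in ms if y != x]
--     return ret_name.title()
-- ===== Notes on version B (the rewrite author's own statement) =====
-- stated objective: alternative
-- what changed: B replaces A's count-dict build plus argmax scan over its keys by a shrinking-worklist extraction loop: repeatedly take the first remaining match, count it, compare with the running best, and purge all its occurrences from the worklist; no count table or second keys pass exists.
import Mathlib
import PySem

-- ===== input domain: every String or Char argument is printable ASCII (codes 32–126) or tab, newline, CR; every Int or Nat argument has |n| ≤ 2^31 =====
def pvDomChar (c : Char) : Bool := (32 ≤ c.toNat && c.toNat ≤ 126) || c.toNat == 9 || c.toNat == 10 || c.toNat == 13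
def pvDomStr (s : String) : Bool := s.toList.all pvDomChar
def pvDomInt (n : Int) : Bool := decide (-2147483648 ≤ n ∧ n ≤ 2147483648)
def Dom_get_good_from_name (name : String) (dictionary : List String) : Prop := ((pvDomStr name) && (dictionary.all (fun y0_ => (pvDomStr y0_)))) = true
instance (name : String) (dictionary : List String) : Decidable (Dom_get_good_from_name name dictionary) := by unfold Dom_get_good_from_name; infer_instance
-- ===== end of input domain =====

-- B replaces A's count-dict plus keys argmax scan by a shrinking-worklist extraction loop
-- (alternative decomposition, not faster); both raise AttributeError when no dictionary item
-- contains name, which Pre_ excludes.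


-- ===== PORT A =====
-- str.title(), hand-ported (no PySem primitive): a letter is uppercased after a non-letter
-- and lowercased after a letter; exact for the ASCII characters Dom admits.
def pyTitleChars : List Char → Bool → List Char
  | [], _ => []
  | c :: cs, prevAlpha =>
    (if PySem.Chars.isalpha c then
        (if prevAlpha then PySem.Chars.lowerChar c else PySem.Chars.upperChar c)
      else c) :: pyTitleChars cs (PySem.Chars.isalpha c)

def pyTitle (s : String) : String := String.ofList (pyTitleChars s.toList false)

def get_good_from_name (name : String) (dictionary : List String) : String :=
  let d : PySem.Dict String Int :=
    dictionary.foldl (fun d item =>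
      if PySem.Str.isIn name item then
        if d.contains item then d.insert item (d.getD item 0 + 1)
        else d.insert item 1
      else d) PySem.Dict.empty
  let r : Option String × Int :=
    d.keys.foldl (fun acc item =>
      if d.getD item 0 > acc.2 then (some item, d.getD item 0) else acc) (none, 0)
  match r.1 with
  | some s => pyTitle s
  | none => ""   -- Python: None.title() raises AttributeError; excluded by Pre_

-- ===== PORT B =====
-- the while-loop of Source B: take the first remaining match, count it, update the running
-- best on strictly greater count, purge all its occurrences, continue on the rest
def extractLoop : List String → Option String × Int → Option String × Int
  | [], acc => acc
  | x :: t, acc =>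
    let c : Int := ((x :: t).count x : Nat)
    extractLoop ((x :: t).filter (fun y => y != x))
      (if c > acc.2 then (some x, c) else acc)
  termination_by ws => ws.length
  decreasing_by
    have h : (x :: t).filter (fun y => y != x) = t.filter (fun y => y != x) := by
      simp
    simp only [h, List.length_cons]
    exact Nat.lt_succ_of_le (List.length_filter_le _ _)

def get_good_from_name_alt (name : String) (dictionary : List String) : String :=
  let ms := dictionary.filter (fun item => PySem.Str.isIn name item)
  match (extractLoop ms (none, 0)).1 with
  | some s => pyTitle s
  | none => ""   -- Python: None.title() raises AttributeError; excluded by Pre_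

-- ===== PRECONDITION & SPEC =====
-- Pre_ excludes exactly the inputs where no dictionary item contains name: there both A and B
-- call None.title() and raise AttributeError.
def Pre_get_good_from_name (name : String) (dictionary : List String) : Prop :=
  ∃ item ∈ dictionary, PySem.Str.isIn name item = true
instance (name : String) (dictionary : List String) : Decidable (Pre_get_good_from_name name dictionary) := by unfold Pre_get_good_from_name; infer_instance

def pvWitness_get_good_from_name : String × List String := ("a", ["ab", "cd", "ab"])

def Spec_get_good_from_name (name : String) (dictionary : List String) (out : String) : Prop := out = get_good_from_name_alt name dictionary
instance (name : String) (dictionary : List String) (out : String) : Decidable (Spec_get_good_from_name name dictionary out) := by unfold Spec_get_good_from_name; infer_instance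

-- ===== CLAIM (what is proved, stated in full; the proofs are below) =====
def Claim_equal_get_good_from_name : Prop := ∀ (name : String) (dictionary : List String), Dom_get_good_from_name name dictionary → Pre_get_good_from_name name dictionary → Spec_get_good_from_name name dictionary (get_good_from_name name dictionary)

-- ===== LEMMAS AND PROOFS =====

-- folding Set.add skips elements already present: duplicates of x may be filtered away
theorem foldl_add_filter_mem (x : String) :
    ∀ (t : List String) (s : PySem.Set String), x ∈ s →
      t.foldl PySem.Set.add s = (t.filter (fun y => y != x)).foldl PySem.Set.add s := by
  intro t
  induction t with
  | nil => intro s _; rfl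
  | cons z t ih =>
    intro s hx
    by_cases hz : z = x
    · subst hz
      have hadd : PySem.Set.add s z = s := by
        unfold PySem.Set.add
        rw [if_pos ((PySem.Set.contains_iff _ _).mpr hx)]
      simp only [List.filter_cons, List.foldl_cons, hadd]
      rw [if_neg (by simp)]
      exact ih s hx
    · have hmem : x ∈ PySem.Set.add s z := by
        unfold PySem.Set.add
        split
        · exact hx
        · exact List.mem_append_left _ hx
      simp only [List.filter_cons]
      rw [if_pos (by simp [hz])]
      simp only [List.foldl_cons]
      exact ih (PySem.Set.add s z) hmem

-- a head element absent from the folded list stays in front of the Set.add fold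
theorem foldl_add_cons_acc (x : String) :
    ∀ (l : List String) (s : PySem.Set String), x ∉ l →
      l.foldl PySem.Set.add (x :: s) = x :: l.foldl PySem.Set.add s := by
  intro l
  induction l with
  | nil => intro s _; rfl
  | cons z l ih =>
    intro s hxl
    have hzx : z ≠ x := fun h => hxl (h ▸ List.mem_cons_self)
    have hxl' : x ∉ l := fun h => hxl (List.mem_cons_of_mem _ h)
    have hct : PySem.Set.contains (x :: s) z = PySem.Set.contains s z := by
      by_cases hzs : z ∈ s
      · rw [(PySem.Set.contains_iff _ _).mpr hzs,
            (PySem.Set.contains_iff _ _).mpr (List.mem_cons_of_mem _ hzs)]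
      · have h1 : PySem.Set.contains s z = false := by
          rw [Bool.eq_false_iff]
          intro h
          exact hzs ((PySem.Set.contains_iff _ _).mp h)
        have h2 : PySem.Set.contains (x :: s) z = false := by
          rw [Bool.eq_false_iff]
          intro h
          rcases List.mem_cons.mp ((PySem.Set.contains_iff _ _).mp h) with h | h
          · exact hzx h
          · exact hzs h
        rw [h1, h2]
    simp only [List.foldl_cons]
    by_cases hc : PySem.Set.contains s z = true
    · have e1 : PySem.Set.add (x :: s) z = x :: s := by
        unfold PySem.Set.add; rw [hct, if_pos hc]
      have e2 : PySem.Set.add s z = s := by unfold PySem.Set.add; rw [if_pos hc]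
      rw [e1, e2, ih s hxl']
    · have e1 : PySem.Set.add (x :: s) z = x :: (s ++ [z]) := by
        unfold PySem.Set.add; rw [hct, if_neg hc]; rfl
      have e2 : PySem.Set.add s z = s ++ [z] := by unfold PySem.Set.add; rw [if_neg hc]
      rw [e1, e2, ih (s ++ [z]) hxl']

-- set(x::t) is x followed by set of t purged of x
theorem ofList_cons_filter (x : String) (t : List String) :
    PySem.Set.ofList (x :: t) = x :: PySem.Set.ofList (t.filter (fun y => y != x)) := by
  have h0 : PySem.Set.ofList (x :: t) = t.foldl PySem.Set.add [x] := by
    simp [PySem.Set.ofList_eq_foldl, PySem.Set.add, PySem.Set.contains]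
  rw [h0, foldl_add_filter_mem x t [x] (List.mem_singleton.mpr rfl)]
  set t' := t.filter (fun y => y != x) with ht'
  have hxt' : x ∉ t' := by
    intro h
    have := List.of_mem_filter h
    simp at this
  have := foldl_add_cons_acc x t' [] hxt'
  simpa [PySem.Set.ofList_eq_foldl] using this

-- purging x changes no other element's count
theorem count_filter_ne (x y : String) (t : List String) (hyx : y ≠ x) :
    (t.filter (fun z => z != x)).count y = t.count y := by
  induction t with
  | nil => rfl
  | cons z t ih =>
    by_cases hz : z = x
    · subst hz
      simp only [List.filter_cons]
      rw [if_neg (by simp)]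
      rw [ih, List.count_cons]
      have hne : (z == y) = false := by simpa using fun h => hyx h.symm
      simp [hne]
    · simp only [List.filter_cons]
      rw [if_pos (by simp [hz])]
      simp only [List.count_cons, ih]

-- the extraction loop is the running-best fold over the distinct matches in first-occurrence
-- order, each valued by its count in the full match list
theorem extractLoop_eq_aux (key : String → Int) :
    ∀ (n : Nat) (ws : List String), ws.length ≤ n → ∀ (acc : Option String × Int),
      (∀ y ∈ ws, ((ws.count y : Nat) : Int) = key y) →
      extractLoop ws acc
        = (PySem.Set.ofList ws).foldl
            (fun a v => if key v > a.2 then (some v, key v) else a) acc := by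
  intro n
  induction n with
  | zero =>
    intro ws hlen acc _
    have : ws = [] := List.eq_nil_of_length_eq_zero (Nat.le_zero.mp hlen)
    subst this
    rw [extractLoop]
    rfl
  | succ n ih =>
    intro ws hlen acc hkey
    cases ws with
    | nil =>
      rw [extractLoop]
      rfl
    | cons x t =>
      rw [extractLoop]
      set ws' := (x :: t).filter (fun y => y != x) with hws'
      have hws'' : ws' = t.filter (fun y => y != x) := by
        rw [hws']
        simp only [List.filter_cons]
        rw [if_neg (by simp)]
      have hlen' : ws'.length ≤ n := by
        rw [hws'']
        have h1 : (t.filter (fun y => y != x)).length ≤ t.length := List.length_filter_le _ _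
        have h2 : t.length + 1 ≤ n + 1 := by simpa using hlen
        omega
      have hkx : (((x :: t).count x : Nat) : Int) = key x := hkey x List.mem_cons_self
      have hkey' : ∀ y ∈ ws', ((ws'.count y : Nat) : Int) = key y := by
        intro y hy
        have hyx : y ≠ x := by
          have := List.of_mem_filter hy
          simpa using this
        have hyt : y ∈ t := by
          rcases List.mem_cons.mp (List.mem_of_mem_filter hy) with h | h
          · exact absurd h hyx
          · exact h
        rw [hws'', count_filter_ne x y t hyx]
        have h1 := hkey y (List.mem_cons_of_mem _ hyt)
        rw [← h1, List.count_cons]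
        simp [Ne.symm hyx]
      rw [ih ws' hlen' _ hkey']
      rw [ofList_cons_filter, ← hws'']
      simp only [List.foldl_cons, hkx]

-- ===== VERDICT (by name: the statement is the Claim_ definition above) =====
theorem get_good_from_name_spec : Claim_equal_get_good_from_name := by
  intro name dictionary _ _
  simp only [Spec_get_good_from_name, get_good_from_name, get_good_from_name_alt]
  -- A's first loop: both branches are d[item] = d.get(item, 0) + 1
  have hfun : (fun (d : PySem.Dict String Int) item =>
      if PySem.Str.isIn name item then
        if d.contains item then d.insert item (d.getD item 0 + 1)
        else d.insert item 1
      else d)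
      = (fun (d : PySem.Dict String Int) item =>
        if PySem.Str.isIn name item then d.insert item (d.getD item 0 + 1) else d) := by
    funext d item
    by_cases hc : d.contains item
    · simp [hc]
    · have hc' : d.contains item = false := by simpa using hc
      simp only [hc', Bool.false_eq_true, if_false]
      rw [PySem.Dict.getD_of_not_contains _ _ hc']
      norm_num
  rw [hfun]
  set ms := dictionary.filter (fun item => PySem.Str.isIn name item) with hms
  -- ... so it builds Counter(ms)
  have hd : dictionary.foldl (fun (d : PySem.Dict String Int) item =>
        if PySem.Str.isIn name item then d.insert item (d.getD item 0 + 1) else d)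
        PySem.Dict.empty
      = PySem.Dict.counter ms := by
    rw [hms, ← List.foldl_filter, PySem.Dict.foldl_insert_getD_add_one_eq_counter]
  rw [hd, PySem.Dict.keys_counter]
  simp only [PySem.Dict.getD_counter]
  -- B's extraction loop is exactly that running-best fold over set(ms)
  rw [extractLoop_eq_aux (fun y => ((ms.count y : Nat) : Int)) ms.length ms le_rfl (none, 0) (fun y _ => rfl)]
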